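-- pv_equiv track=rewrite | github.com/Lakrofn/Programacion | DAW1/programacion/PYTHON/cadenas/1.py | siglas
-- ===== SOURCE A (Python) =====
-- def siglas(cadena):
--     abecedario = "ABCDEFGHIJKLMNOPQRSTUVWXYZ"
--
--     palabra = ""
--     acumulador = ""
--
--     for letra in cadena:
--         palabra += letra
--         if letra == " ":
--             if palabra[0] in abecedario:
--                 acumulador += palabra[0]
--                 palabra = ""
--             else:
--                 palabra = ""
--     if palabra[0] in abecedario:
--         acumulador += palabra[0]
--
--     return acumulador
-- ===== SOURCE B (Python) =====
-- def siglas(cadena):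
--     abecedario = "ABCDEFGHIJKLMNOPQRSTUVWXYZ"
--     starts = [0] + [i + 1 for i, c in enumerate(cadena) if c == " "]
--     return "".join(cadena[s] for s in starts if cadena[s] in abecedario)
-- ===== Notes on version B (the rewrite author's own statement) =====
-- stated objective: simpler
-- what changed: Replaces the char-by-char loop with a running word accumulator by a two-phase index computation: first collect word-start positions (0 and each position after a space), then join the start characters that are uppercase letters.
import Mathlib
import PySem

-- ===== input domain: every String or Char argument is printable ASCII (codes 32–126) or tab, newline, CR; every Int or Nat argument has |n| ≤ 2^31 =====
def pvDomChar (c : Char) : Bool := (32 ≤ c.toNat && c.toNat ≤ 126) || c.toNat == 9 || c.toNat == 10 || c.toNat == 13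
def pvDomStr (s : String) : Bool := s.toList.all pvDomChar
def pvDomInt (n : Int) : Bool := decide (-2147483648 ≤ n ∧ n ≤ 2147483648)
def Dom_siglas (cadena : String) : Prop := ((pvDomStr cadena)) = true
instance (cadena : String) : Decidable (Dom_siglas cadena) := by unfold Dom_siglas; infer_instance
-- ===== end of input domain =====

-- B builds the acronym from the word-start positions in two phases instead of A's
-- char-by-char loop with a word accumulator; same behaviour, simpler code, no speed claim.

-- shared constant (both Pythons use the same uppercase alphabet literal)
def pvAbecedario : List Char := "ABCDEFGHIJKLMNOPQRSTUVWXYZ".toList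

-- ===== PORT A =====
-- loop body of A: palabra += letra; on space, test/emit palabra[0] and reset
def pvStepA (st : List Char × List Char) (letra : Char) : List Char × List Char :=
  let palabra := st.1 ++ [letra]
  if letra = ' ' then
    match palabra.head? with
    | some h => if h ∈ pvAbecedario then ([], st.2 ++ [h]) else ([], st.2)
    | none => ([], st.2)   -- unreachable: palabra just received a character
  else (palabra, st.2)

def siglas (cadena : String) : String :=
  let st := cadena.toList.foldl pvStepA ([], [])
  match st.1.head? with
  | some h => if h ∈ pvAbecedario then String.mk (st.2 ++ [h]) else String.mk st.2
  | none => String.mk st.2   -- Python raises IndexError here (palabra empty); excluded by Pre_siglas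

-- ===== PORT B =====
def siglas_alt (cadena : String) : String :=
  let cs := cadena.toList
  let starts : List Int :=
    0 :: (PySem.List.enumerate cs).filterMap (fun p => if p.2 = ' ' then some (p.1 + 1) else none)
  String.mk (starts.filterMap (fun s =>
    match PySem.List.pyGet? cs s with
    | some c => if c ∈ pvAbecedario then some c else none
    | none => none))   -- Python raises IndexError here (start == len); excluded by Pre_siglas

-- ===== PRECONDITION & SPEC =====
-- Both Pythons raise IndexError exactly when the string is empty or ends in a space
-- (A: palabra[0] on empty palabra; B: cadena[s] with s == len(cadena)); Pre_ excludes those.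
def Pre_siglas (cadena : String) : Prop :=
  cadena.toList ≠ [] ∧ cadena.toList.getLast? ≠ some ' '
instance (cadena : String) : Decidable (Pre_siglas cadena) := by unfold Pre_siglas; infer_instance

def pvWitness_siglas : String := "Hola Mundo"

def Spec_siglas (cadena : String) (out : String) : Prop := out = siglas_alt cadena
instance (cadena : String) (out : String) : Decidable (Spec_siglas cadena out) := by unfold Spec_siglas; infer_instance

-- ===== CLAIM (what is proved, stated in full; the proofs are below) =====
def Claim_equal_siglas : Prop := ∀ (cadena : String), Dom_siglas cadena → Pre_siglas cadena → Spec_siglas cadena (siglas cadena)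

-- ===== LEMMAS AND PROOFS =====

-- common reference function: acronym of the rest of the string given the (optional)
-- first character of the current word
def fspec : Option Char → List Char → List Char
  | h, [] => match h with | some x => if x ∈ pvAbecedario then [x] else [] | none => []
  | h, c :: cs =>
    if c = ' ' then
      (if h.getD ' ' ∈ pvAbecedario then [h.getD ' '] else []) ++ fspec none cs
    else fspec (some (h.getD c)) cs

-- A's final palabra[0] check, as a function of the fold state
def finA (st : List Char × List Char) : List Char :=
  match st.1.head? with
  | some h => if h ∈ pvAbecedario then st.2 ++ [h] else st.2
  | none => st.2

lemma siglas_eq (cadena : String) :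
    siglas cadena = String.mk (finA (cadena.toList.foldl pvStepA ([], []))) := by
  unfold siglas finA
  rcases cadena.toList.foldl pvStepA ([], []) with ⟨pal, acc⟩
  cases pal <;> simp <;> split <;> rfl

lemma foldA : ∀ (cs pal acc : List Char),
    finA (cs.foldl pvStepA (pal, acc)) = acc ++ fspec pal.head? cs := by
  intro cs
  induction cs with
  | nil => intro pal acc; cases pal <;> simp [finA, fspec] <;> split <;> simp
  | cons c cs ih =>
    intro pal acc
    by_cases hc : c = ' ' <;> cases pal <;>
      simp [List.foldl_cons, pvStepA, fspec, hc, ih] <;> split <;> simp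

-- selector of B: the char at position n if it is an uppercase letter
def selN (cs : List Char) (n : Nat) : Option Char :=
  match cs[n]? with
  | some c => if c ∈ pvAbecedario then some c else none
  | none => none

-- word-start offsets contributed by the spaces of cs (position after each space)
def spacePos : List Char → List Nat
  | [] => []
  | c :: cs => (if c = ' ' then [1] else []) ++ (spacePos cs).map (· + 1)

lemma selN_zero (c : Char) (cs : List Char) :
    selN (c :: cs) 0 = if c ∈ pvAbecedario then some c else none := rfl

lemma selN_succ (c : Char) (cs : List Char) (n : Nat) :
    selN (c :: cs) (n + 1) = selN cs n := by
  simp [selN]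

lemma filterMap_selN_shift (c : Char) (cs : List Char) (l : List Nat) :
    ((l.map (· + 1)).filterMap (selN (c :: cs))) = l.filterMap (selN cs) := by
  rw [List.filterMap_map]
  exact List.filterMap_congr (fun n _ => selN_succ c cs n)

lemma filterMap_cons_split (f : Nat → Option Char) (n : Nat) (l : List Nat) :
    (n :: l).filterMap f = (f n).toList ++ l.filterMap f := by
  rw [List.filterMap_cons]
  cases f n <;> simp

lemma enum_filter : ∀ (cs : List Char) (s : Nat),
    (PySem.List.enumerate cs (s : Int)).filterMap
        (fun p => if p.2 = ' ' then some (p.1 + 1) else none)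
      = (spacePos cs).map (fun n => ((s + n : Nat) : Int)) := by
  intro cs
  induction cs with
  | nil => intro s; simp [PySem.List.enumerate_nil, spacePos]
  | cons c cs ih =>
    intro s
    have hs : ((s : Int) + 1) = ((s + 1 : Nat) : Int) := by omega
    rw [PySem.List.enumerate_cons, List.filterMap_cons, hs, ih (s + 1)]
    by_cases hc : c = ' '
    · subst hc
      simp only [spacePos, if_pos rfl, ite_true, List.singleton_append, List.map_cons,
        List.map_map]
      refine List.cons_eq_cons.mpr ⟨by omega, ?_⟩
      exact List.map_congr_left (fun n _ => by simp only [Function.comp_apply]; omega)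
    · simp only [spacePos, hc, ite_false, if_neg hc, List.nil_append, List.map_map]
      exact List.map_congr_left (fun n _ => by simp only [Function.comp_apply]; omega)

-- joint characterisation of B's two phases by the reference function
lemma emitB : ∀ cs : List Char,
    ((0 :: spacePos cs).filterMap (selN cs) = fspec none cs) ∧
    (∀ x, fspec (some x) cs
        = (if x ∈ pvAbecedario then [x] else []) ++ (spacePos cs).filterMap (selN cs)) := by
  intro cs
  induction cs with
  | nil =>
    constructor
    · rfl
    · intro x; show _ = _ ++ []; rw [List.append_nil]; rfl
  | cons c cs ih =>
    obtain ⟨ih1, ih2⟩ := ih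
    have hsp : (' ' : Char) ∉ pvAbecedario := by decide
    constructor
    · rw [filterMap_cons_split, selN_zero]
      by_cases hc : c = ' '
      · subst hc
        rw [if_neg hsp]
        simp only [spacePos, ite_true, List.singleton_append]
        rw [filterMap_cons_split, selN_succ, filterMap_selN_shift]
        show _ = fspec none (' ' :: cs)
        simp only [fspec, ite_true, Option.getD_none, if_neg hsp, List.nil_append]
        rw [← ih1, filterMap_cons_split]
        rfl
      · simp only [spacePos, hc, ite_false, List.nil_append]
        rw [filterMap_selN_shift]
        simp only [fspec, hc, ite_false, Option.getD_none]
        rw [ih2 c]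
        split <;> simp
    · intro x
      by_cases hc : c = ' '
      · subst hc
        simp only [fspec, ite_true, Option.getD_some, spacePos, List.singleton_append]
        rw [filterMap_cons_split, selN_succ, filterMap_selN_shift, ← ih1, filterMap_cons_split]
      · simp only [fspec, hc, ite_false, Option.getD_some, spacePos, List.nil_append]
        rw [filterMap_selN_shift]
        exact ih2 x

lemma siglas_alt_eq (cadena : String) :
    siglas_alt cadena = String.mk (fspec none cadena.toList) := by
  have h0 := enum_filter cadena.toList 0
  simp only [Nat.cast_zero, Nat.zero_add] at h0
  simp only [siglas_alt]
  rw [h0]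
  rw [show ((0 : Int) :: List.map (fun n : Nat => (n : Int)) (spacePos cadena.toList))
      = List.map (fun n : Nat => (n : Int)) (0 :: spacePos cadena.toList) from rfl]
  rw [List.filterMap_map]
  rw [List.filterMap_congr (g := selN cadena.toList) (fun n _ => by
    simp only [Function.comp_apply, PySem.List.pyGet?_natCast, selN])]
  rw [(emitB cadena.toList).1]

-- ===== VERDICT (by name: the statement is the Claim_ definition above) =====
theorem siglas_spec : Claim_equal_siglas := by
  intro cadena _ _
  unfold Spec_siglas
  rw [siglas_eq, siglas_alt_eq, foldA]
  rfl
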